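-- pv_equiv track=rewrite | github.com/TylerGarlick/abraxas | skills/episteme/scripts/audit.py | identify_epistemic_gaps
-- ===== SOURCE A (Python) =====
-- from typing import Dict, List, Any, Optional
--
-- def identify_epistemic_gaps(claim: str) -> List[Dict[str, str]]:
--     """Identify potential gaps in the claim's epistemic foundation."""
--     gaps = []
--
--     # Check for unsupported superlatives
--     if any(word in claim.lower() for word in ["always", "never", "all", "none", "every"]):
--         gaps.append({
--             "type": "absolute_claim",
--             "description": "Absolute claims require universal evidence",
--             "severity": "high"
--         })
--
--     # Check for causal claims without mechanism
--     causal_markers = ["causes", "leads to", "results in", "because"]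
--     if any(m in claim.lower() for m in causal_markers):
--         if "mechanism" not in claim.lower() and "study" not in claim.lower():
--             gaps.append({
--                 "type": "causal_without_mechanism",
--                 "description": "Causal claim without explained mechanism or citation",
--                 "severity": "medium"
--             })
--
--     # Check for statistical claims without source
--     if "%" in claim or "percent" in claim.lower():
--         if "study" not in claim.lower() and "source" not in claim.lower():
--             gaps.append({
--                 "type": "statistical_without_source",
--                 "description": "Statistical claim without cited source",
--                 "severity": "high"
--             })
--
--     # Check for future predictions
--     future_markers = ["will", "going to", "future", "predict"]
--     if any(m in claim.lower() for m in future_markers):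
--         gaps.append({
--             "type": "prediction",
--             "description": "Future prediction - inherently uncertain",
--             "severity": "low"
--         })
--
--     return gaps
-- ===== SOURCE B (Python) =====
-- # Different algorithm: one left-to-right scan over the lowered claim collects the
-- # set of known keywords occurring anywhere (position-driven multi-pattern match);
-- # the four gap rules are then evaluated against that found-set, not the text.
-- _WORDS = ["always", "never", "all", "none", "every",
--           "causes", "leads to", "results in", "because",
--           "mechanism", "study", "%", "percent", "source",
--           "will", "going to", "future", "predict"]
--
-- def identify_epistemic_gaps(claim):
--     lc = claim.lower()
--     found = set()
--     for i in range(len(lc)):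
--         for w in _WORDS:
--             if lc.startswith(w, i):
--                 found.add(w)
--     gaps = []
--     if any(w in found for w in ("always", "never", "all", "none", "every")):
--         gaps.append({
--             "type": "absolute_claim",
--             "description": "Absolute claims require universal evidence",
--             "severity": "high",
--         })
--     if any(w in found for w in ("causes", "leads to", "results in", "because")) \
--             and ("mechanism" not in found and "study" not in found):
--         gaps.append({
--             "type": "causal_without_mechanism",
--             "description": "Causal claim without explained mechanism or citation",
--             "severity": "medium",
--         })
--     if ("%" in found or "percent" in found) \
--             and ("study" not in found and "source" not in found):
--         gaps.append({
--             "type": "statistical_without_source",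
--             "description": "Statistical claim without cited source",
--             "severity": "high",
--         })
--     if any(w in found for w in ("will", "going to", "future", "predict")):
--         gaps.append({
--             "type": "prediction",
--             "description": "Future prediction - inherently uncertain",
--             "severity": "low",
--         })
--     return gaps
-- ===== Notes on version B (the rewrite author's own statement) =====
-- stated objective: alternative
-- what changed: Replaced A's per-keyword substring tests with a single position-driven scan of the lowered claim that builds the set of keywords occurring in it, after which the four gap rules are decided by set membership alone.
import Mathlib
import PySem

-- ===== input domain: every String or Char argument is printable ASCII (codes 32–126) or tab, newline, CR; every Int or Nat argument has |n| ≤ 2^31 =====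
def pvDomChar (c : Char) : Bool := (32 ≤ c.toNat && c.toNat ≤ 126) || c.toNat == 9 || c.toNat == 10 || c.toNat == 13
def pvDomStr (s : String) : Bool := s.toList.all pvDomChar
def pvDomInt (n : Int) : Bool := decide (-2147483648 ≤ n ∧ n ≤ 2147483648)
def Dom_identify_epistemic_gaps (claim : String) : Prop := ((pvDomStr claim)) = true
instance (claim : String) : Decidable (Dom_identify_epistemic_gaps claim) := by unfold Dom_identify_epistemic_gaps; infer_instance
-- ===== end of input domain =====

-- B replaces A's per-keyword substring tests by a single position scan of the lowered
-- claim collecting the set of occurring keywords, from which the gap rules are decided;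
-- objective: alternative.

-- ===== PORT A =====
def identify_epistemic_gaps (claim : String) : List (List (String × String)) :=
  let gaps : List (List (String × String)) := []
  let gaps := if (["always", "never", "all", "none", "every"].any
      (fun word => PySem.Str.isIn word (PySem.Str.lower claim))) then
    gaps ++ [[("type", "absolute_claim"),
              ("description", "Absolute claims require universal evidence"),
              ("severity", "high")]]
  else gaps
  let causal_markers := ["causes", "leads to", "results in", "because"]
  let gaps := if (causal_markers.any (fun m => PySem.Str.isIn m (PySem.Str.lower claim))) then
    (if (!PySem.Str.isIn "mechanism" (PySem.Str.lower claim)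
        && !PySem.Str.isIn "study" (PySem.Str.lower claim)) then
      gaps ++ [[("type", "causal_without_mechanism"),
                ("description", "Causal claim without explained mechanism or citation"),
                ("severity", "medium")]]
    else gaps)
  else gaps
  let gaps := if (PySem.Str.isIn "%" claim || PySem.Str.isIn "percent" (PySem.Str.lower claim)) then
    (if (!PySem.Str.isIn "study" (PySem.Str.lower claim)
        && !PySem.Str.isIn "source" (PySem.Str.lower claim)) then
      gaps ++ [[("type", "statistical_without_source"),
                ("description", "Statistical claim without cited source"),
                ("severity", "high")]]
    else gaps)
  else gaps
  let future_markers := ["will", "going to", "future", "predict"]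
  let gaps := if (future_markers.any (fun m => PySem.Str.isIn m (PySem.Str.lower claim))) then
    gaps ++ [[("type", "prediction"),
              ("description", "Future prediction - inherently uncertain"),
              ("severity", "low")]]
  else gaps
  gaps

-- ===== PORT B =====
-- the keyword vocabulary the scanner recognises (Source B's _WORDS)
def pvWords : List String :=
  ["always", "never", "all", "none", "every",
   "causes", "leads to", "results in", "because",
   "mechanism", "study", "%", "percent", "source",
   "will", "going to", "future", "predict"]

-- the scan loop of Source B: for every position i, record each keyword starting there.
-- lc.startswith(w, i) for 0 ≤ i is startswith on l.drop i.toNat — exact here since pyRange 0 n 1 yields only 0 ≤ i.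
def pvScan (l : List Char) : PySem.Set String :=
  (PySem.List.pyRange 0 l.length 1).foldl (fun s i =>
    pvWords.foldl (fun s w =>
      if PySem.Chars.startswith (l.drop i.toNat) w.toList then PySem.Set.add s w else s) s)
    PySem.Set.empty

def identify_epistemic_gaps_alt (claim : String) : List (List (String × String)) :=
  let lc := PySem.Str.lower claim
  let found : PySem.Set String := pvScan lc.toList
  let gaps : List (List (String × String)) := []
  let gaps := if (["always", "never", "all", "none", "every"].any
      (fun w => PySem.Set.contains found w)) then
    gaps ++ [[("type", "absolute_claim"),
              ("description", "Absolute claims require universal evidence"),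
              ("severity", "high")]]
  else gaps
  let gaps := if (["causes", "leads to", "results in", "because"].any
        (fun w => PySem.Set.contains found w))
      && (!PySem.Set.contains found "mechanism" && !PySem.Set.contains found "study") then
    gaps ++ [[("type", "causal_without_mechanism"),
              ("description", "Causal claim without explained mechanism or citation"),
              ("severity", "medium")]]
  else gaps
  let gaps := if (PySem.Set.contains found "%" || PySem.Set.contains found "percent")
      && (!PySem.Set.contains found "study" && !PySem.Set.contains found "source") then
    gaps ++ [[("type", "statistical_without_source"),
              ("description", "Statistical claim without cited source"),
              ("severity", "high")]]
  else gaps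
  let gaps := if (["will", "going to", "future", "predict"].any
      (fun w => PySem.Set.contains found w)) then
    gaps ++ [[("type", "prediction"),
              ("description", "Future prediction - inherently uncertain"),
              ("severity", "low")]]
  else gaps
  gaps

-- ===== PRECONDITION & SPEC =====
def Spec_identify_epistemic_gaps (claim : String) (out : List (List (String × String))) : Prop := out = identify_epistemic_gaps_alt claim
instance (claim : String) (out : List (List (String × String))) : Decidable (Spec_identify_epistemic_gaps claim out) := by unfold Spec_identify_epistemic_gaps; infer_instance

-- ===== CLAIM (what is proved, stated in full; the proofs are below) =====
def Claim_equal_identify_epistemic_gaps : Prop := ∀ (claim : String), Dom_identify_epistemic_gaps claim → Spec_identify_epistemic_gaps claim (identify_epistemic_gaps claim)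

-- ===== LEMMAS AND PROOFS =====

-- membership in the inner fold over the vocabulary
theorem mem_fold_words (P : String → Bool) (ws : List String) (s : PySem.Set String) (x : String) :
    x ∈ ws.foldl (fun s w => if P w then PySem.Set.add s w else s) s ↔
      x ∈ s ∨ (x ∈ ws ∧ P x = true) := by
  induction ws generalizing s with
  | nil => simp
  | cons w ws ih =>
    simp only [List.foldl_cons, ih, List.mem_cons]
    by_cases hp : P w
    · simp only [hp, if_pos, PySem.Set.mem_add]
      constructor
      · rintro (⟨h | rfl⟩ | h)
        · exact Or.inl h
        · exact Or.inr ⟨Or.inl rfl, hp⟩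
        · exact Or.inr ⟨Or.inr h.1, h.2⟩
      · rintro (h | ⟨(rfl | h), hx⟩)
        · exact Or.inl (Or.inl h)
        · exact Or.inl (Or.inr rfl)
        · exact Or.inr ⟨h, hx⟩
    · simp only [hp, if_neg, Bool.not_eq_true]
      constructor
      · rintro (h | h)
        · exact Or.inl h
        · exact Or.inr ⟨Or.inr h.1, h.2⟩
      · rintro (h | ⟨(rfl | h), hx⟩)
        · exact Or.inl h
        · exact absurd hx (by simp [hp])
        · exact Or.inr ⟨h, hx⟩

-- membership in the outer fold over the positions
theorem mem_fold_range (Q : Int → String → Bool) (is : List Int) (s : PySem.Set String) (x : String) :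
    x ∈ is.foldl (fun s i =>
        pvWords.foldl (fun s w => if Q i w then PySem.Set.add s w else s) s) s ↔
      x ∈ s ∨ (x ∈ pvWords ∧ ∃ i ∈ is, Q i x = true) := by
  induction is generalizing s with
  | nil => simp
  | cons i is ih =>
    simp only [List.foldl_cons, ih, mem_fold_words, List.mem_cons]
    constructor
    · rintro ((h | h) | ⟨hw, j, hj, hq⟩)
      · exact Or.inl h
      · exact Or.inr ⟨h.1, i, Or.inl rfl, h.2⟩
      · exact Or.inr ⟨hw, j, Or.inr hj, hq⟩
    · rintro (h | ⟨hw, j, (rfl | hj), hq⟩)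
      · exact Or.inl (Or.inl h)
      · exact Or.inl (Or.inr ⟨hw, hq⟩)
      · exact Or.inr ⟨hw, j, hj, hq⟩

-- a vocabulary word is collected by the scan iff it occurs as a substring
theorem contains_scan_eq (l : List Char) (w : String)
    (hw : w ∈ pvWords) (hne : w.toList ≠ []) :
    PySem.Set.contains (pvScan l) w = PySem.Chars.isIn w.toList l := by
  rw [Bool.eq_iff_iff, PySem.Set.contains_iff, ← PySem.Chars.exists_prefix_drop_iff_isIn]
  unfold pvScan
  rw [mem_fold_range (fun i w => PySem.Chars.startswith (l.drop i.toNat) w.toList) _ _ w]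
  simp only [PySem.Set.empty, List.not_mem_nil, false_or]
  constructor
  · rintro ⟨-, i, hi, hs⟩
    exact ⟨i.toNat, (PySem.Chars.startswith_iff _ _).mp hs⟩
  · rintro ⟨j, hj⟩
    refine ⟨hw, (j : Int), ?_, ?_⟩
    · rw [PySem.List.mem_pyRange_one]
      refine ⟨Int.natCast_nonneg j, ?_⟩
      have hd : l.drop j ≠ [] := by
        intro h0
        rw [h0, List.prefix_nil] at hj
        exact hne hj
      have : j < l.length := by
        by_contra hge
        exact hd (List.drop_eq_nil_of_le (by omega))
      exact_mod_cast this
    · rw [Int.toNat_natCast]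
      exact (PySem.Chars.startswith_iff _ _).mpr hj

-- lowering a character yields '%' only for '%' itself
theorem lowerChar_eq_percent_iff (c : Char) : PySem.Chars.lowerChar c = '%' ↔ c = '%' := by
  unfold PySem.Chars.lowerChar
  split_ifs with h
  · constructor
    · intro hc
      exfalso
      unfold PySem.Chars.isupper at h
      rw [Bool.and_eq_true, decide_eq_true_eq, decide_eq_true_eq] at h
      have h1 : 65 ≤ c.toNat := h.1
      have h2 : c.toNat ≤ 90 := h.2
      have hv : (Char.ofNat (c.toNat + 32)).toNat = c.toNat + 32 := by
        rw [Char.toNat_ofNat, if_pos]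
        exact Or.inl (by omega)
      rw [hc] at hv
      have h37 : ('%' : Char).toNat = 37 := rfl
      omega
    · intro hc
      exfalso
      unfold PySem.Chars.isupper at h
      rw [Bool.and_eq_true, decide_eq_true_eq, decide_eq_true_eq] at h
      subst hc
      have h1 : 65 ≤ ('%' : Char).toNat := h.1
      have h37 : ('%' : Char).toNat = 37 := rfl
      omega
  · exact Iff.rfl

-- '%' survives lowering: it is in the lowered character list iff it is in the original
theorem mem_percent_lower (l : List Char) : '%' ∈ PySem.Chars.lower l ↔ '%' ∈ l := by
  unfold PySem.Chars.lower
  rw [List.mem_map]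
  constructor
  · rintro ⟨c, hc, hl⟩
    rwa [(lowerChar_eq_percent_iff c).mp hl] at hc
  · intro h
    exact ⟨'%', h, (lowerChar_eq_percent_iff '%').mpr rfl⟩

-- a singleton list is an infix iff its element is a member
theorem singleton_infix_iff {α : Type} (a : α) (l : List α) : [a] <:+: l ↔ a ∈ l := by
  constructor
  · intro h
    exact (List.singleton_sublist).mp h.sublist
  · intro h
    obtain ⟨s, t, rfl⟩ := List.append_of_mem h
    exact ⟨s, t, by simp⟩

-- checking '%' in the lowered claim equals checking it in the original claim
theorem isIn_percent_lower (claim : String) :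
    PySem.Chars.isIn "%".toList (PySem.Str.lower claim).toList = PySem.Str.isIn "%" claim := by
  have htl : (PySem.Str.lower claim).toList = PySem.Chars.lower claim.toList := by simp
  have he : ("%".toList : List Char) = ['%'] := rfl
  rw [Bool.eq_iff_iff, PySem.Chars.isIn_iff_infix, PySem.Str.isIn_iff_infix, htl, he,
    singleton_infix_iff, singleton_infix_iff, mem_percent_lower]

-- collapse A's nested ifs into the &&-guarded append B uses
theorem if_if_eq_if_and {α : Type} (c1 c2 : Bool) (x y : α) :
    (if c1 then (if c2 then x else y) else y) = (if c1 && c2 then x else y) := by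
  cases c1 <;> cases c2 <;> simp

-- ===== VERDICT (by name: the statement is the Claim_ definition above) =====
theorem identify_epistemic_gaps_spec : Claim_equal_identify_epistemic_gaps := by
  intro claim _
  show identify_epistemic_gaps claim = identify_epistemic_gaps_alt claim
  unfold identify_epistemic_gaps identify_epistemic_gaps_alt
  simp only [List.any_cons, List.any_nil, Bool.or_false, PySem.Str.isIn_eq]
  rw [contains_scan_eq _ "always" (by decide) (by decide),
      contains_scan_eq _ "never" (by decide) (by decide),
      contains_scan_eq _ "all" (by decide) (by decide),
      contains_scan_eq _ "none" (by decide) (by decide),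
      contains_scan_eq _ "every" (by decide) (by decide),
      contains_scan_eq _ "causes" (by decide) (by decide),
      contains_scan_eq _ "leads to" (by decide) (by decide),
      contains_scan_eq _ "results in" (by decide) (by decide),
      contains_scan_eq _ "because" (by decide) (by decide),
      contains_scan_eq _ "mechanism" (by decide) (by decide),
      contains_scan_eq _ "study" (by decide) (by decide),
      contains_scan_eq _ "%" (by decide) (by decide),
      contains_scan_eq _ "percent" (by decide) (by decide),
      contains_scan_eq _ "source" (by decide) (by decide),
      contains_scan_eq _ "will" (by decide) (by decide),
      contains_scan_eq _ "going to" (by decide) (by decide),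
      contains_scan_eq _ "future" (by decide) (by decide),
      contains_scan_eq _ "predict" (by decide) (by decide),
      isIn_percent_lower]
  simp only [PySem.Str.isIn_eq, if_if_eq_if_and]
  rfl
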